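-- pv_equiv track=rewrite | github.com/beskrovniibv/leetcode | 2658/2658-1.py | findMaxFish
-- ===== SOURCE A (Python) =====
-- from collections import deque
-- from typing import List
--
-- def findMaxFish(grid: List[List[int]]) -> int:
--     result = 0
--     row_num, col_num = len(grid), len(grid[0])
--     visited = [[False]*col_num for _ in range(row_num)]
--     dirs = ((0, +1), (0, -1), (+1, 0), (-1, 0))
--     for row in range(row_num):
--         for col in range(col_num):
--             if grid[row][col] != 0 and not visited[row][col]:
--                 q = deque([(row, col)])
--                 t = 0
--                 while q:
--                     r, c = q.popleft()
--                     if visited[r][c]: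
--                         continue
--                     visited[r][c] = True
--                     t += grid[r][c]
--                     for (dr, dc) in dirs:
--                         nr = r + dr
--                         nc = c + dc
--                         if nr >= 0 and nr < row_num and nc >= 0 and nc < col_num and grid[nr][nc] != 0:
--                             q.append((nr, nc))
--                 result = max(result, t)
--     return result
-- ===== SOURCE B (Python) =====
-- def findMaxFish(grid):
--     rows, cols = len(grid), len(grid[0])
--     cells = [(r, c) for r in range(rows) for c in range(cols) if grid[r][c] != 0]
--     # label propagation: every nonzero cell starts with its own id; repeatedly
--     # replace each label by the minimum over the cell and its labelled neighbours
--     # until nothing changes; equal final labels = same connected component.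
--     lab = {(r, c): r * cols + c for (r, c) in cells}
--     while True:
--         new = {}
--         for (r, c) in cells:
--             m = lab[(r, c)]
--             for nb in ((r, c - 1), (r, c + 1), (r - 1, c), (r + 1, c)):
--                 if nb in lab and lab[nb] < m:
--                     m = lab[nb]
--             new[(r, c)] = m
--         if new == lab:
--             break
--         lab = new
--     sums = {}
--     for p in cells:
--         sums[lab[p]] = sums.get(lab[p], 0) + grid[p[0]][p[1]]
--     best = 0
--     for s in sums.values():
--         best = max(best, s)
--     return best
-- ===== Notes on version B (the rewrite author's own statement) =====
-- stated objective: alternative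
-- what changed: Replaces per-component BFS with a visited matrix by global min-label propagation: every nonzero cell starts with its own id, labels are repeatedly replaced by the minimum over the cell and its labelled neighbours until a fixpoint, then a single group-by pass sums each label class and the answer is the maximum of those sums and 0.
import Mathlib
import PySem

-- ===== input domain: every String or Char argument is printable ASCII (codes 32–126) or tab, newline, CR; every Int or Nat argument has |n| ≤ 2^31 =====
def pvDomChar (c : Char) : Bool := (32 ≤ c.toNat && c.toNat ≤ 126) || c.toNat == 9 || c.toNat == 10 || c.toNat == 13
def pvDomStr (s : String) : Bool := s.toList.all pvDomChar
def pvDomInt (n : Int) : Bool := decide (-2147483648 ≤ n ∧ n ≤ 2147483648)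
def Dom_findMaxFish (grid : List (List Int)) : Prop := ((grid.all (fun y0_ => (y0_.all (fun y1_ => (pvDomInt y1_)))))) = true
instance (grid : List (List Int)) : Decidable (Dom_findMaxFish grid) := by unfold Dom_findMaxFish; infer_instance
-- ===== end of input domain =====

-- B replaces A's per-component BFS by min-label propagation to a fixpoint plus one
-- group-by-label summing pass (objective: alternative algorithm, not faster).

-- ===== PORT A =====
-- shared access helper: grid[r][c] (all accesses of both programs are guarded in range on Pre_ inputs)
def pvVal (grid : List (List Int)) (p : Nat × Nat) : Int := (grid.getD p.1 []).getD p.2 0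

-- A's dirs tuple, applied to (r, c): (0,+1),(0,-1),(+1,0),(-1,0)
def pvNbrCand (p : Nat × Nat) : List (Int × Int) :=
  [((p.1:Int), (p.2:Int)+1), ((p.1:Int), (p.2:Int)-1), ((p.1:Int)+1, (p.2:Int)), ((p.1:Int)-1, (p.2:Int))]

-- number of unvisited cells of the grid rectangle (termination measure only)
def pvUnvis (R C : Nat) (vis : Nat × Nat → Bool) : Nat :=
  ((Finset.range R ×ˢ Finset.range C).filter (fun p => vis p = false)).card

-- cited by bfsLoop's decreasing_by: marking one in-range unvisited cell shrinks the measure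
theorem pvUnvis_update (R C : Nat) (vis : Nat × Nat → Bool) (p : Nat × Nat)
    (h1 : p.1 < R) (h2 : p.2 < C) (h3 : vis p = false) :
    pvUnvis R C (fun x => if x = p then true else vis x) + 1 = pvUnvis R C vis := by
  have hmem : p ∈ (Finset.range R ×ˢ Finset.range C).filter (fun x => vis x = false) := by
    simp [Finset.mem_filter, Finset.mem_product, h1, h2, h3]
  have : ((Finset.range R ×ˢ Finset.range C).filter
      (fun x => (fun y => if y = p then true else vis y) x = false))
      = ((Finset.range R ×ˢ Finset.range C).filter (fun x => vis x = false)).erase p := by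
    ext x
    by_cases hxp : x = p <;> simp [Finset.mem_erase, Finset.mem_filter, hxp, h3]
  unfold pvUnvis
  rw [this, Finset.card_erase_of_mem hmem]
  have : 0 < ((Finset.range R ×ˢ Finset.range C).filter (fun x => vis x = false)).card :=
    Finset.card_pos.mpr ⟨p, hmem⟩
  omega

-- the BFS while-loop of A: state = (queue, visited, t)
def bfsLoop (grid : List (List Int)) (R C : Nat) (q : List (Nat × Nat))
    (vis : Nat × Nat → Bool) (t : Int) : (Nat × Nat → Bool) × Int :=
  match q with
  | [] => (vis, t)
  | p :: q' =>
    if vis p then bfsLoop grid R C q' vis t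
    else if hin : p.1 < R ∧ p.2 < C then
      let vis' : Nat × Nat → Bool := fun x => if x = p then true else vis x
      let adds := ((pvNbrCand p).filter (fun z =>
          decide (0 ≤ z.1) && decide (z.1 < (R:Int)) && decide (0 ≤ z.2) && decide (z.2 < (C:Int))
            && decide (pvVal grid (z.1.toNat, z.2.toNat) ≠ 0))).map (fun z => (z.1.toNat, z.2.toNat))
      bfsLoop grid R C (q' ++ adds) vis' (t + pvVal grid p)
    else bfsLoop grid R C q' vis t  -- totality guard: queue cells are always in range in real runs
termination_by 5 * pvUnvis R C vis + q.length
decreasing_by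
  · simp
  · have h := pvUnvis_update R C vis p hin.1 hin.2 (by simpa using ‹¬ vis p = true›)
    have hadds : (((pvNbrCand p).filter (fun z =>
        decide (0 ≤ z.1) && decide (z.1 < (R:Int)) && decide (0 ≤ z.2) && decide (z.2 < (C:Int))
          && decide (pvVal grid (z.1.toNat, z.2.toNat) ≠ 0))).map (fun z => (z.1.toNat, z.2.toNat))).length ≤ 4 := by
      rw [List.length_map]
      exact le_trans (List.length_filter_le _ _) (by simp [pvNbrCand])
    simp only [List.length_append, List.length_cons, dite_eq_ite]
    omega
  · simp

-- row-major list of all grid coordinates: 'for row in range(R): for col in range(C):'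
def pvCellList (R C : Nat) : List (Nat × Nat) :=
  (List.range R).flatMap (fun r => (List.range C).map (fun c => (r, c)))

def findMaxFish (grid : List (List Int)) : Int :=
  let R := grid.length
  let C := (grid.getD 0 []).length
  ((pvCellList R C).foldl (fun st p =>
      if pvVal grid p ≠ 0 ∧ st.1 p = false then
        let res := bfsLoop grid R C [p] st.1 0
        (res.1, max st.2 res.2)
      else st)
    ((fun _ => false), 0)).2

-- ===== PORT B =====
-- cells: row-major list of the nonzero coordinates
def pvCells (grid : List (List Int)) : List (Nat × Nat) :=
  (pvCellList grid.length (grid.getD 0 []).length).filter (fun p => pvVal grid p ≠ 0)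

-- r * cols + c: the initial label of a cell
def pvIdx (C : Nat) (p : Nat × Nat) : Nat := p.1 * C + p.2

-- a dict built by one insertion per cell (B's dict comprehensions / per-round dict builds)
def pvMkMap {ν : Type} (l : List (Nat × Nat)) (f : (Nat × Nat) → ν) : PySem.Dict (Nat × Nat) ν :=
  l.foldl (fun d p => d.insert p (f p)) PySem.Dict.empty

-- cited by pvPropLoop's decreasing_by (and the proofs): lookup in such a dict
theorem get?_foldl_insert {ν : Type} (l : List (Nat × Nat)) (f : (Nat × Nat) → ν)
    (d : PySem.Dict (Nat × Nat) ν) (x : Nat × Nat) :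
    (l.foldl (fun d p => d.insert p (f p)) d).get? x = if x ∈ l then some (f x) else d.get? x := by
  induction l generalizing d with
  | nil => simp
  | cons p l ih =>
    simp only [List.foldl_cons, ih, PySem.Dict.get?_insert, List.mem_cons]
    by_cases hl : x ∈ l <;> by_cases hp : x = p <;> simp [hl, hp]

theorem get?_pvMkMap {ν : Type} (l : List (Nat × Nat)) (f : (Nat × Nat) → ν) (x : Nat × Nat) :
    (pvMkMap l f).get? x = if x ∈ l then some (f x) else none := by
  rw [pvMkMap, get?_foldl_insert]
  split <;> simp [PySem.Dict.get?_empty]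

theorem getD_pvMkMap {ν : Type} (l : List (Nat × Nat)) (f : (Nat × Nat) → ν) (x : Nat × Nat) (d0 : ν) :
    (pvMkMap l f).getD x d0 = if x ∈ l then f x else d0 := by
  rw [PySem.Dict.getD_eq_get?_getD, get?_pvMkMap]
  split <;> rfl

-- B's neighbour tuple of (r, c): (r,c-1),(r,c+1),(r-1,c),(r+1,c)
def pvNbr4 (p : Nat × Nat) : List (Int × Int) :=
  [((p.1:Int), (p.2:Int)-1), ((p.1:Int), (p.2:Int)+1), ((p.1:Int)-1, (p.2:Int)), ((p.1:Int)+1, (p.2:Int))]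

-- inner loop of a propagation round: m = min of lab[(r,c)] and the labels of labelled neighbours
-- ('nb in lab' for a possibly negative nb is the 0 ≤ guards plus contains on the Nat key)
def pvStep (lab : PySem.Dict (Nat × Nat) Nat) (p : Nat × Nat) : Nat :=
  (pvNbr4 p).foldl (fun m z =>
      if (0 ≤ z.1 ∧ 0 ≤ z.2 ∧ lab.contains (z.1.toNat, z.2.toNat) = true)
          ∧ lab.getD (z.1.toNat, z.2.toNat) 0 < m
        then lab.getD (z.1.toNat, z.2.toNat) 0 else m)
    (lab.getD p 0)

-- generic facts about that min-fold, cited by the termination proof and the lemmas below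
theorem foldlMin_props {α : Type} (P : α → Prop) [DecidablePred P] (v : α → Nat)
    (l : List α) (m0 : Nat) :
    (l.foldl (fun m z => if P z ∧ v z < m then v z else m) m0) ≤ m0
    ∧ (∀ z ∈ l, P z → (l.foldl (fun m z => if P z ∧ v z < m then v z else m) m0) ≤ v z)
    ∧ ((l.foldl (fun m z => if P z ∧ v z < m then v z else m) m0) = m0
        ∨ ∃ z ∈ l, P z ∧ (l.foldl (fun m z => if P z ∧ v z < m then v z else m) m0) = v z) := by
  induction l generalizing m0 with
  | nil => exact ⟨le_refl _, by simp, Or.inl rfl⟩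
  | cons z l ih =>
    simp only [List.foldl_cons]
    by_cases hc : P z ∧ v z < m0
    · rw [if_pos hc]
      obtain ⟨ih1, ih2, ih3⟩ := ih (v z)
      refine ⟨le_trans ih1 (le_of_lt hc.2), ?_, ?_⟩
      · intro w hw hPw
        rcases List.mem_cons.mp hw with h | h
        · subst h; exact ih1
        · exact ih2 w h hPw
      · rcases ih3 with h | ⟨w, hw, hPw, hval⟩
        · exact Or.inr ⟨z, List.mem_cons_self .., hc.1, h⟩
        · exact Or.inr ⟨w, List.mem_cons_of_mem _ hw, hPw, hval⟩
    · rw [if_neg hc]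
      obtain ⟨ih1, ih2, ih3⟩ := ih m0
      refine ⟨ih1, ?_, ?_⟩
      · intro w hw hPw
        rcases List.mem_cons.mp hw with h | h
        · subst h
          have : ¬ v w < m0 := fun hlt => hc ⟨hPw, hlt⟩
          omega
        · exact ih2 w h hPw
      · rcases ih3 with h | ⟨w, hw, hPw, hval⟩
        · exact Or.inl h
        · exact Or.inr ⟨w, List.mem_cons_of_mem _ hw, hPw, hval⟩

theorem pvStep_le (lab : PySem.Dict (Nat × Nat) Nat) (p : Nat × Nat) :
    pvStep lab p ≤ lab.getD p 0 := by
  have h := foldlMin_props (P := fun z : Int × Int => 0 ≤ z.1 ∧ 0 ≤ z.2 ∧ lab.contains (z.1.toNat, z.2.toNat) = true)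
    (v := fun z : Int × Int => lab.getD (z.1.toNat, z.2.toNat) 0) (pvNbr4 p) (lab.getD p 0)
  exact h.1

-- termination measure of the propagation: total of all labels
def pvMeasure (cells : List (Nat × Nat)) (lab : PySem.Dict (Nat × Nat) Nat) : Nat :=
  (cells.map (fun p => lab.getD p 0)).sum

-- 'while True: new = {…}; if new == lab: break; lab = new'  (keys of new and lab are both
-- exactly cells, so Python's order-insensitive dict == is value equality at every cell)
def pvPropLoop (cells : List (Nat × Nat)) (lab : PySem.Dict (Nat × Nat) Nat) :
    PySem.Dict (Nat × Nat) Nat :=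
  let new := pvMkMap cells (pvStep lab)
  if cells.all (fun p => new.getD p 0 == lab.getD p 0) then lab
  else pvPropLoop cells new
termination_by pvMeasure cells lab
decreasing_by
  rename_i h
  simp only [List.all_eq_true, beq_iff_eq, not_forall] at h
  unfold pvMeasure
  apply List.sum_lt_sum
  · intro p hp
    rw [getD_pvMkMap]
    simp only [hp, if_true]
    exact pvStep_le lab p
  · obtain ⟨p, hp, hne⟩ := h
    refine ⟨p, hp, ?_⟩
    rw [getD_pvMkMap] at hne ⊢
    simp only [hp, if_true] at hne ⊢
    have := pvStep_le lab p
    omega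

def findMaxFish_alt (grid : List (List Int)) : Int :=
  let C := (grid.getD 0 []).length
  let cells := pvCells grid
  let lab := pvPropLoop cells (pvMkMap cells (pvIdx C))
  let sums := cells.foldl (fun d p =>
      d.insert (lab.getD p 0) (d.getD (lab.getD p 0) 0 + pvVal grid p)) PySem.Dict.empty
  sums.values.foldl (fun b s => max b s) 0

-- ===== PRECONDITION & SPEC =====
-- Pre_ excludes exactly the inputs where Python A raises: the empty grid (grid[0] is an
-- IndexError) and grids where some row is shorter than row 0 (indexing such a row raises).
def Pre_findMaxFish (grid : List (List Int)) : Prop :=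
  grid ≠ [] ∧ ∀ row ∈ grid, (grid.getD 0 []).length ≤ row.length
instance (grid : List (List Int)) : Decidable (Pre_findMaxFish grid) := by
  unfold Pre_findMaxFish; infer_instance

def pvWitness_findMaxFish : List (List Int) := [[1, 2, 0], [0, 3, 4]]

def Spec_findMaxFish (grid : List (List Int)) (out : Int) : Prop := out = findMaxFish_alt grid
instance (grid : List (List Int)) (out : Int) : Decidable (Spec_findMaxFish grid out) := by
  unfold Spec_findMaxFish; infer_instance

-- ===== CLAIM (what is proved, stated in full; the proofs are below) =====
def Claim_equal_findMaxFish : Prop := ∀ (grid : List (List Int)), Dom_findMaxFish grid →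
  Pre_findMaxFish grid → Spec_findMaxFish grid (findMaxFish grid)

-- ===== LEMMAS AND PROOFS =====

-- ---------- the common specification: connected components of nonzero cells ----------

def pvC (grid : List (List Int)) : Nat := (grid.getD 0 []).length

def nzP (grid : List (List Int)) (p : Nat × Nat) : Prop :=
  p.1 < grid.length ∧ p.2 < pvC grid ∧ pvVal grid p ≠ 0

def nbRel (p q : Nat × Nat) : Prop :=
  (p.1 = q.1 ∧ (p.2 + 1 = q.2 ∨ q.2 + 1 = p.2)) ∨ (p.2 = q.2 ∧ (p.1 + 1 = q.1 ∨ q.1 + 1 = p.1))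

def adjP (grid : List (List Int)) (p q : Nat × Nat) : Prop :=
  nzP grid p ∧ nzP grid q ∧ nbRel p q

def connP (grid : List (List Int)) : (Nat × Nat) → (Nat × Nat) → Prop :=
  Relation.ReflTransGen (adjP grid)

noncomputable def comp (grid : List (List Int)) (p : Nat × Nat) : Finset (Nat × Nat) :=
  @Finset.filter _ (fun q => connP grid p q) (fun q => Classical.dec _)
    (Finset.range grid.length ×ˢ Finset.range (pvC grid))

noncomputable def compSum (grid : List (List Int)) (p : Nat × Nat) : Int :=
  ∑ q ∈ comp grid p, pvVal grid q

noncomputable def specMax (grid : List (List Int)) : Int :=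
  ((pvCells grid).map (fun p => compSum grid p)).foldl max 0

theorem adjP_symm (grid : List (List Int)) (p q : Nat × Nat) (h : adjP grid p q) : adjP grid q p := by
  obtain ⟨h1, h2, h3⟩ := h
  exact ⟨h2, h1, by unfold nbRel at h3 ⊢; omega⟩

theorem connP_symm (grid : List (List Int)) (p q : Nat × Nat) (h : connP grid p q) : connP grid q p :=
  (Relation.ReflTransGen.symmetric (fun _ _ hh => adjP_symm grid _ _ hh)) h

theorem connP_nz (grid : List (List Int)) (p q : Nat × Nat) (hp : nzP grid p) (h : connP grid p q) :
    nzP grid q := by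
  induction h with
  | refl => exact hp
  | tail _ hstep _ => exact hstep.2.1

theorem mem_comp (grid : List (List Int)) (p q : Nat × Nat) (hp : nzP grid p) :
    q ∈ comp grid p ↔ connP grid p q := by
  unfold comp
  simp only [Finset.mem_filter, Finset.mem_product, Finset.mem_range]
  constructor
  · exact fun h => h.2
  · intro h
    have := connP_nz grid p q hp h
    exact ⟨⟨this.1, this.2.1⟩, h⟩

theorem comp_congr (grid : List (List Int)) (p q : Nat × Nat) (h : connP grid p q) :
    comp grid p = comp grid q := by
  unfold comp
  ext z
  simp only [Finset.mem_filter]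
  have h' := connP_symm grid p q h
  exact ⟨fun hz => ⟨hz.1, h'.trans hz.2⟩, fun hz => ⟨hz.1, h.trans hz.2⟩⟩

theorem compSum_congr (grid : List (List Int)) (p q : Nat × Nat) (h : connP grid p q) :
    compSum grid p = compSum grid q := by
  unfold compSum; rw [comp_congr grid p q h]

theorem mem_pvCellList (R C : Nat) (p : Nat × Nat) :
    p ∈ pvCellList R C ↔ p.1 < R ∧ p.2 < C := by
  unfold pvCellList
  rcases p with ⟨r, c⟩
  simp [List.mem_flatMap, List.mem_range]

theorem nodup_pvCellList (R C : Nat) : (pvCellList R C).Nodup := by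
  unfold pvCellList
  rw [List.nodup_flatMap]
  constructor
  · intro r _
    exact (List.nodup_range).map (fun x y h => by simpa using h)
  · have : List.Pairwise (· ≠ ·) (List.range R) := List.nodup_range
    apply this.imp
    intro r s hrs
    simp only [Function.onFun, List.Disjoint, List.mem_map, List.mem_range]
    rintro ⟨a, b⟩ ⟨c1, _, h1⟩ ⟨c2, _, h2⟩
    apply hrs
    rw [Prod.ext_iff] at h1 h2
    omega

theorem mem_pvCells (grid : List (List Int)) (p : Nat × Nat) :
    p ∈ pvCells grid ↔ nzP grid p := by
  unfold pvCells nzP pvC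
  simp only [List.mem_filter, mem_pvCellList, decide_not, Bool.not_eq_eq_eq_not, Bool.not_true,
    decide_eq_false_iff_not]
  tauto

theorem nodup_pvCells (grid : List (List Int)) : (pvCells grid).Nodup :=
  (nodup_pvCellList _ _).filter _

-- ---------- A-side: BFS computes the component and its sum ----------

def newVis (grid : List (List Int)) (V0 vis : Nat × Nat → Bool) : Finset (Nat × Nat) :=
  (Finset.range grid.length ×ˢ Finset.range (pvC grid)).filter
    (fun p => vis p = true ∧ V0 p = false)

theorem mem_adds (grid : List (List Int)) (p r : Nat × Nat) (hp : nzP grid p) :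
    (r ∈ ((pvNbrCand p).filter (fun z =>
        decide (0 ≤ z.1) && decide (z.1 < (grid.length : Int)) && decide (0 ≤ z.2)
          && decide (z.2 < ((pvC grid) : Int))
          && decide (pvVal grid (z.1.toNat, z.2.toNat) ≠ 0))).map
        (fun z => (z.1.toNat, z.2.toNat)))
      ↔ adjP grid p r := by
  constructor
  · intro hmem
    simp only [pvNbrCand, List.mem_map, List.mem_filter, List.mem_cons, List.not_mem_nil,
      or_false, Bool.and_eq_true, decide_eq_true_eq] at hmem
    obtain ⟨z, ⟨hz, ⟨⟨⟨hz1, hz2⟩, hz3⟩, hz4⟩, hz5⟩, hzr⟩ := hmem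
    subst hzr
    rcases hz with h | h | h | h <;> subst h <;>
      exact ⟨hp, ⟨by simp only [nzP] at *; omega, by simp only [nzP] at *; omega, hz5⟩,
        by unfold nbRel; omega⟩
  · intro hadj
    obtain ⟨_, ⟨hr1, hr2, hr3⟩, hnb⟩ := hadj
    simp only [pvNbrCand, List.mem_map, List.mem_filter, List.mem_cons, List.not_mem_nil,
      or_false, Bool.and_eq_true, decide_eq_true_eq]
    unfold nbRel at hnb
    rcases hnb with ⟨h1, h2 | h2⟩ | ⟨h1, h2 | h2⟩
    · have hre : (((p.1:Int)).toNat, (((p.2:Int)) + 1).toNat) = r := by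
        apply Prod.ext <;> simp <;> omega
      exact ⟨_, ⟨Or.inl rfl, ⟨⟨⟨by omega, by rw [hre] at *; omega⟩, by omega⟩,
        by rw [hre] at *; push_cast; omega⟩, by rw [hre]; exact hr3⟩, hre⟩
    · have hre : (((p.1:Int)).toNat, (((p.2:Int)) - 1).toNat) = r := by
        apply Prod.ext <;> simp <;> omega
      exact ⟨_, ⟨Or.inr (Or.inl rfl), ⟨⟨⟨by omega, by rw [hre] at *; omega⟩, by omega⟩,
        by rw [hre] at *; push_cast; omega⟩, by rw [hre]; exact hr3⟩, hre⟩
    · have hre : ((((p.1:Int)) + 1).toNat, ((p.2:Int)).toNat) = r := by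
        apply Prod.ext <;> simp <;> omega
      exact ⟨_, ⟨Or.inr (Or.inr (Or.inl rfl)), ⟨⟨⟨by omega, by rw [hre] at *; omega⟩, by omega⟩,
        by rw [hre] at *; push_cast; omega⟩, by rw [hre]; exact hr3⟩, hre⟩
    · have hre : ((((p.1:Int)) - 1).toNat, ((p.2:Int)).toNat) = r := by
        apply Prod.ext <;> simp <;> omega
      exact ⟨_, ⟨Or.inr (Or.inr (Or.inr rfl)), ⟨⟨⟨by omega, by rw [hre] at *; omega⟩, by omega⟩,
        by rw [hre] at *; push_cast; omega⟩, by rw [hre]; exact hr3⟩, hre⟩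

theorem bfs_inv (grid : List (List Int)) (x : Nat × Nat) (V0 : Nat × Nat → Bool)
    (hx : nzP grid x)
    (hV0sat : ∀ p q, V0 p = true → adjP grid p q → V0 q = true)
    (hV0nz : ∀ p, V0 p = true → nzP grid p)
    (hx0 : V0 x = false) :
    ∀ (q : List (Nat × Nat)) (vis : Nat × Nat → Bool) (t : Int),
    (∀ p, V0 p = true → vis p = true) →
    (∀ p, vis p = true → V0 p = true ∨ (connP grid x p ∧ nzP grid p)) →
    (∀ p ∈ q, nzP grid p ∧ connP grid x p) →
    (∀ p, vis p = true → V0 p = false → ∀ r, adjP grid p r → vis r = true ∨ r ∈ q) →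
    (vis x = true ∨ x ∈ q) →
    (t = ∑ p ∈ newVis grid V0 vis, pvVal grid p) →
    (∀ p, (bfsLoop grid grid.length (pvC grid) q vis t).1 p = true
        ↔ (V0 p = true ∨ (connP grid x p ∧ nzP grid p)))
    ∧ (bfsLoop grid grid.length (pvC grid) q vis t).2 = compSum grid x := by
  have hV0conn : ∀ z w, V0 z = true → connP grid z w → V0 w = true := by
    intro z w hz h
    induction h with
    | refl => exact hz
    | tail _ hstep ih => exact hV0sat _ _ ih hstep
  have hV0comp : ∀ z, connP grid x z → V0 z = false := by
    intro z hc
    by_cases h : V0 z = true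
    · exact absurd (hV0conn z x h (connP_symm grid x z hc)) (by simp [hx0])
    · simpa using h
  intro q vis t
  induction q, vis, t using bfsLoop.induct grid grid.length (pvC grid) with
  | case1 vis t =>
    intro h1 h2 h3 h4 h5 h6
    have hfull : ∀ p, vis p = true ↔ (V0 p = true ∨ (connP grid x p ∧ nzP grid p)) := by
      intro p
      constructor
      · exact h2 p
      · rintro (h | ⟨hconn, hnp⟩)
        · exact h1 p h
        · clear hnp
          induction hconn with
          | refl =>
            rcases h5 with h | h
            · exact h
            · exact absurd h (List.not_mem_nil)
          | tail hxb hstep ih =>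
            rename_i b c
            have hvb : vis b = true := ih
            rcases h2 b hvb with hb | hb
            · exact h1 _ (hV0sat b c hb hstep)
            · have : V0 b = false := hV0comp b hb.1
              rcases h4 b hvb this c hstep with h | h
              · exact h
              · simp at h
    refine ⟨by simpa [bfsLoop] using hfull, ?_⟩
    have : newVis grid V0 vis = comp grid x := by
      unfold newVis comp
      ext z
      simp only [Finset.mem_filter, Finset.mem_product, Finset.mem_range]
      constructor
      · rintro ⟨hrect, hv, hV0⟩
        rcases h2 z hv with h | h
        · rw [h] at hV0; simp at hV0
        · exact ⟨hrect, h.1⟩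
      · rintro ⟨hrect, hconn⟩
        refine ⟨hrect, (hfull z).mpr (Or.inr ⟨hconn, connP_nz grid x z hx hconn⟩), hV0comp z hconn⟩
    simpa [bfsLoop, compSum, this] using h6
  | case2 vis t p q' hvp ih =>
    intro h1 h2 h3 h4 h5 h6
    rw [bfsLoop, if_pos hvp]
    apply ih
    · exact h1
    · exact h2
    · exact fun r hr => h3 r (List.mem_cons_of_mem _ hr)
    · intro z hvz hV0z r hadj
      rcases h4 z hvz hV0z r hadj with h | h
      · exact Or.inl h
      · rcases List.mem_cons.mp h with h | h
        · exact Or.inl (h ▸ hvp)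
        · exact Or.inr h
    · rcases h5 with h | h
      · exact Or.inl h
      · rcases List.mem_cons.mp h with h | h
        · exact Or.inl (h ▸ hvp)
        · exact Or.inr h
    · exact h6
  | case3 vis t p q' hvp hin vis' adds ih =>
    intro h1 h2 h3 h4 h5 h6
    obtain ⟨hnp, hcp⟩ := h3 p (List.mem_cons_self ..)
    have hV0p : V0 p = false := hV0comp p hcp
    have hmem := fun r => mem_adds grid p r hnp
    have hA : ∀ z, V0 z = true → (if z = p then true else vis z) = true := by
      intro z h
      have := h1 z h
      split <;> simp_all
    have hB : ∀ z, (if z = p then true else vis z) = true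
        → V0 z = true ∨ (connP grid x z ∧ nzP grid z) := by
      intro z hz
      by_cases hzp : z = p
      · exact Or.inr (hzp ▸ ⟨hcp, hnp⟩)
      · exact h2 z (by simpa [hzp] using hz)
    have hC : ∀ r ∈ q' ++ ((pvNbrCand p).filter (fun z =>
        decide (0 ≤ z.1) && decide (z.1 < (grid.length : Int)) && decide (0 ≤ z.2)
          && decide (z.2 < ((pvC grid) : Int))
          && decide (pvVal grid (z.1.toNat, z.2.toNat) ≠ 0))).map
        (fun z => (z.1.toNat, z.2.toNat)), nzP grid r ∧ connP grid x r := by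
      intro r hr
      rcases List.mem_append.mp hr with h | h
      · exact h3 r (List.mem_cons_of_mem _ h)
      · have hadj := (hmem r).mp h
        exact ⟨hadj.2.1, hcp.tail hadj⟩
    have hD : ∀ z, (if z = p then true else vis z) = true → V0 z = false →
        ∀ r, adjP grid z r → (if r = p then true else vis r) = true
          ∨ r ∈ q' ++ ((pvNbrCand p).filter (fun z =>
              decide (0 ≤ z.1) && decide (z.1 < (grid.length : Int)) && decide (0 ≤ z.2)
                && decide (z.2 < ((pvC grid) : Int))
                && decide (pvVal grid (z.1.toNat, z.2.toNat) ≠ 0))).map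
              (fun z => (z.1.toNat, z.2.toNat)) := by
      intro z hvz hV0z r hadj
      by_cases hzp : z = p
      · subst hzp
        exact Or.inr (List.mem_append.mpr (Or.inr ((hmem r).mpr hadj)))
      · have hvz' : vis z = true := by simpa [hzp] using hvz
        rcases h4 z hvz' hV0z r hadj with h | h
        · exact Or.inl (by simp [h])
        · rcases List.mem_cons.mp h with h | h
          · exact Or.inl (by simp [h])
          · exact Or.inr (List.mem_append.mpr (Or.inl h))
    have hE : (if x = p then true else vis x) = true
        ∨ x ∈ q' ++ ((pvNbrCand p).filter (fun z =>
            decide (0 ≤ z.1) && decide (z.1 < (grid.length : Int)) && decide (0 ≤ z.2)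
              && decide (z.2 < ((pvC grid) : Int))
              && decide (pvVal grid (z.1.toNat, z.2.toNat) ≠ 0))).map
            (fun z => (z.1.toNat, z.2.toNat)) := by
      rcases h5 with h | h
      · exact Or.inl (by simp [h])
      · rcases List.mem_cons.mp h with h | h
        · exact Or.inl (by simp [h])
        · exact Or.inr (List.mem_append.mpr (Or.inl h))
    have hF : t + pvVal grid p
        = ∑ z ∈ newVis grid V0 (fun x => if x = p then true else vis x), pvVal grid z := by
      have hset : newVis grid V0 (fun x => if x = p then true else vis x)
          = insert p (newVis grid V0 vis) := by
        unfold newVis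
        ext z
        simp only [Finset.mem_insert, Finset.mem_filter, Finset.mem_product, Finset.mem_range]
        by_cases hzp : z = p
        · subst hzp
          simp [hin.1, hin.2, hV0p]
        · simp [hzp]
      have hpnot : p ∉ newVis grid V0 vis := by
        unfold newVis
        simp only [Finset.mem_filter, Finset.mem_product, Finset.mem_range]
        intro h
        exact hvp h.2.1
      rw [hset, Finset.sum_insert hpnot, h6]
      ring
    have hres := ih hA hB hC hD hE hF
    rw [bfsLoop, if_neg hvp, dif_pos hin]
    exact hres
  | case4 vis t p q' hvp hin ih =>
    intro h1 h2 h3 h4 h5 h6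
    exact absurd ⟨(h3 p (List.mem_cons_self ..)).1.1, (h3 p (List.mem_cons_self ..)).1.2.1⟩ hin

theorem outer_fold (grid : List (List Int)) (suf : List (Nat × Nat)) :
    ∀ (vis : Nat × Nat → Bool) (res : Int),
    (∀ p ∈ suf, p.1 < grid.length ∧ p.2 < pvC grid) →
    (∀ p q, vis p = true → adjP grid p q → vis q = true) →
    (∀ p, vis p = true → nzP grid p) →
    (∀ p, vis p = true → compSum grid p ≤ res) →
    (suf.foldl (fun st p =>
        if pvVal grid p ≠ 0 ∧ st.1 p = false then
          let res := bfsLoop grid grid.length (pvC grid) [p] st.1 0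
          (res.1, max st.2 res.2)
        else st) (vis, res)).2
      = ((suf.filter (fun p => pvVal grid p ≠ 0)).map (fun p => compSum grid p)).foldl max res := by
  induction suf with
  | nil => intro vis res _ _ _ _; simp
  | cons p suf ih =>
    intro vis res hbnd hsat hnz hle
    simp only [List.foldl_cons]
    by_cases hv : pvVal grid p ≠ 0
    · by_cases hvis : vis p = false
      · rw [if_pos ⟨hv, hvis⟩]
        have hnp : nzP grid p :=
          ⟨(hbnd p (List.mem_cons_self ..)).1, (hbnd p (List.mem_cons_self ..)).2, hv⟩
        have hvis' : ¬ vis p = true := by simp [hvis]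
        have hbfs := bfs_inv grid p vis hnp hsat hnz hvis [p] vis 0
          (fun _ h => h) (fun z hz => Or.inl hz)
          (fun z hz => by
            rcases List.mem_cons.mp hz with h | h
            · rw [h]; exact ⟨hnp, Relation.ReflTransGen.refl⟩
            · exact absurd h (List.not_mem_nil))
          (fun z hz hz2 _ _ => by rw [hz] at hz2; cases hz2)
          (Or.inr (List.mem_cons_self ..))
          (by
            unfold newVis
            rw [Finset.filter_false_of_mem, Finset.sum_empty]
            intro z _ h
            rw [h.1] at h
            exact absurd h.2 (by simp))
        rw [List.filter_cons_of_pos (by simpa using hv)]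
        simp only [List.map_cons, List.foldl_cons]
        rw [ih _ _ (fun z hz => hbnd z (List.mem_cons_of_mem _ hz)) ?_ ?_ ?_]
        · rw [hbfs.2]
        · intro z w hz hadj
          rcases (hbfs.1 z).mp hz with h | h
          · exact (hbfs.1 w).mpr (Or.inl (hsat z w h hadj))
          · exact (hbfs.1 w).mpr (Or.inr ⟨h.1.tail hadj, hadj.2.1⟩)
        · intro z hz
          rcases (hbfs.1 z).mp hz with h | h
          · exact hnz z h
          · exact h.2
        · intro z hz
          rcases (hbfs.1 z).mp hz with h | h
          · exact le_trans (hle z h) (le_max_left _ _)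
          · rw [← compSum_congr grid p z h.1, ← hbfs.2]
            exact le_max_right _ _
      · have hvp : vis p = true := by simpa using hvis
        rw [if_neg (by simp [hvp])]
        have hnp : nzP grid p :=
          ⟨(hbnd p (List.mem_cons_self ..)).1, (hbnd p (List.mem_cons_self ..)).2, hv⟩
        rw [List.filter_cons_of_pos (by simpa using hv)]
        simp only [List.map_cons, List.foldl_cons]
        rw [ih _ _ (fun z hz => hbnd z (List.mem_cons_of_mem _ hz)) hsat hnz hle,
          max_eq_left (hle p hvp)]
    · rw [if_neg (by tauto)]
      rw [List.filter_cons_of_neg (by simpa using hv)]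
      exact ih _ _ (fun z hz => hbnd z (List.mem_cons_of_mem _ hz)) hsat hnz hle

theorem a_eq_spec (grid : List (List Int)) : findMaxFish grid = specMax grid := by
  have h := outer_fold grid (pvCellList grid.length (pvC grid)) (fun _ => false) 0
    (fun p hp => (mem_pvCellList _ _ p).mp hp)
    (by simp) (by simp) (by simp)
  unfold findMaxFish specMax pvCells pvC at *
  exact h

-- ---------- B-side: label propagation reaches a component labelling ----------

def labGood (grid : List (List Int)) (lab : PySem.Dict (Nat × Nat) Nat) : Prop :=
  (∀ p, lab.contains p = true ↔ p ∈ pvCells grid)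
  ∧ (∀ p ∈ pvCells grid, ∃ q ∈ pvCells grid, connP grid p q ∧ lab.getD p 0 = pvIdx (pvC grid) q)

theorem contains_pvMkMap {ν : Type} (l : List (Nat × Nat)) (f : (Nat × Nat) → ν) (x : Nat × Nat) :
    (pvMkMap l f).contains x = true ↔ x ∈ l := by
  rw [PySem.Dict.contains_eq_isSome_get?, get?_pvMkMap]
  by_cases hp : x ∈ l <;> simp [hp]

theorem nbr4_adj (grid : List (List Int)) (p : Nat × Nat) (z : Int × Int) (hp : nzP grid p)
    (hz : z ∈ pvNbr4 p) (h1 : 0 ≤ z.1) (h2 : 0 ≤ z.2)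
    (hw : nzP grid (z.1.toNat, z.2.toNat)) : adjP grid p (z.1.toNat, z.2.toNat) := by
  refine ⟨hp, hw, ?_⟩
  simp only [pvNbr4, List.mem_cons, List.not_mem_nil, or_false] at hz
  unfold nbRel
  rcases hz with h | h | h | h <;> subst h <;> simp <;> omega

theorem nbRel_nbr4 (p q : Nat × Nat) (h : nbRel p q) :
    ∃ z ∈ pvNbr4 p, 0 ≤ z.1 ∧ 0 ≤ z.2 ∧ (z.1.toNat, z.2.toNat) = q := by
  unfold nbRel at h
  rcases h with ⟨h1, h2 | h2⟩ | ⟨h1, h2 | h2⟩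
  · exact ⟨((p.1:Int), (p.2:Int)+1), by simp [pvNbr4], by omega, by omega,
      Prod.ext (by simp; omega) (by simp; omega)⟩
  · exact ⟨((p.1:Int), (p.2:Int)-1), by simp [pvNbr4], by omega, by omega,
      Prod.ext (by simp; omega) (by simp; omega)⟩
  · exact ⟨((p.1:Int)+1, (p.2:Int)), by simp [pvNbr4], by omega, by omega,
      Prod.ext (by simp; omega) (by simp; omega)⟩
  · exact ⟨((p.1:Int)-1, (p.2:Int)), by simp [pvNbr4], by omega, by omega,
      Prod.ext (by simp; omega) (by simp; omega)⟩

theorem pvStep_cases (lab : PySem.Dict (Nat × Nat) Nat) (p : Nat × Nat) :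
    pvStep lab p = lab.getD p 0
    ∨ ∃ z ∈ pvNbr4 p, (0 ≤ z.1 ∧ 0 ≤ z.2 ∧ lab.contains (z.1.toNat, z.2.toNat) = true)
        ∧ pvStep lab p = lab.getD (z.1.toNat, z.2.toNat) 0 := by
  have h := foldlMin_props
    (P := fun z : Int × Int => 0 ≤ z.1 ∧ 0 ≤ z.2 ∧ lab.contains (z.1.toNat, z.2.toNat) = true)
    (v := fun z : Int × Int => lab.getD (z.1.toNat, z.2.toNat) 0) (pvNbr4 p) (lab.getD p 0)
  exact h.2.2

theorem pvStep_le_nbr (lab : PySem.Dict (Nat × Nat) Nat) (p : Nat × Nat) (z : Int × Int)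
    (hz : z ∈ pvNbr4 p) (h1 : 0 ≤ z.1) (h2 : 0 ≤ z.2)
    (hc : lab.contains (z.1.toNat, z.2.toNat) = true) :
    pvStep lab p ≤ lab.getD (z.1.toNat, z.2.toNat) 0 := by
  have h := foldlMin_props
    (P := fun z : Int × Int => 0 ≤ z.1 ∧ 0 ≤ z.2 ∧ lab.contains (z.1.toNat, z.2.toNat) = true)
    (v := fun z : Int × Int => lab.getD (z.1.toNat, z.2.toNat) 0) (pvNbr4 p) (lab.getD p 0)
  exact h.2.1 z hz ⟨h1, h2, hc⟩

theorem labGood_step (grid : List (List Int)) (lab : PySem.Dict (Nat × Nat) Nat)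
    (h : labGood grid lab) : labGood grid (pvMkMap (pvCells grid) (pvStep lab)) := by
  obtain ⟨hc, hach⟩ := h
  constructor
  · exact contains_pvMkMap _ _
  · intro p hp
    rw [getD_pvMkMap, if_pos hp]
    rcases pvStep_cases lab p with h | ⟨z, hzmem, ⟨h1, h2, h3⟩, heq⟩
    · obtain ⟨q, hq, hconn, heq'⟩ := hach p hp
      exact ⟨q, hq, hconn, by rw [h, heq']⟩
    · have hw : (z.1.toNat, z.2.toNat) ∈ pvCells grid := (hc _).mp h3
      have hadj : adjP grid p (z.1.toNat, z.2.toNat) :=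
        nbr4_adj grid p z ((mem_pvCells grid p).mp hp) hzmem h1 h2 ((mem_pvCells grid _).mp hw)
      obtain ⟨q, hq, hconn, heq'⟩ := hach _ hw
      exact ⟨q, hq, (Relation.ReflTransGen.single hadj).trans hconn, by rw [heq, heq']⟩

theorem propLoop_good (grid : List (List Int)) :
    ∀ (lab : PySem.Dict (Nat × Nat) Nat), labGood grid lab →
    labGood grid (pvPropLoop (pvCells grid) lab)
    ∧ (∀ p ∈ pvCells grid,
        pvStep (pvPropLoop (pvCells grid) lab) p = (pvPropLoop (pvCells grid) lab).getD p 0) := by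
  intro lab
  induction lab using pvPropLoop.induct (pvCells grid) with
  | case1 lab new h =>
    intro hgood
    rw [pvPropLoop, if_pos h]
    refine ⟨hgood, ?_⟩
    intro p hp
    simp only [List.all_eq_true, beq_iff_eq] at h
    have := h p hp
    rwa [getD_pvMkMap, if_pos hp] at this
  | case2 lab new h ih =>
    intro hgood
    rw [pvPropLoop, if_neg h]
    exact ih (labGood_step grid lab hgood)

theorem fix_edge (grid : List (List Int)) (lab : PySem.Dict (Nat × Nat) Nat)
    (hgood : labGood grid lab)
    (hfix : ∀ p ∈ pvCells grid, pvStep lab p = lab.getD p 0)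
    (p q : Nat × Nat) (hp : p ∈ pvCells grid) (hq : q ∈ pvCells grid) (hnb : nbRel p q) :
    lab.getD p 0 = lab.getD q 0 := by
  have hle : ∀ a b : Nat × Nat, a ∈ pvCells grid → b ∈ pvCells grid → nbRel a b →
      lab.getD a 0 ≤ lab.getD b 0 := by
    intro a b ha hb hab
    obtain ⟨z, hzmem, h1, h2, hzb⟩ := nbRel_nbr4 a b hab
    have := pvStep_le_nbr lab a z hzmem h1 h2 (by rw [hzb]; exact (hgood.1 b).mpr hb)
    rw [hzb] at this
    rw [← hfix a ha]
    exact this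
  have hnb' : nbRel q p := by unfold nbRel at hnb ⊢; omega
  exact le_antisymm (hle p q hp hq hnb) (hle q p hq hp hnb')

theorem lab_of_conn (grid : List (List Int)) (lab : PySem.Dict (Nat × Nat) Nat)
    (hgood : labGood grid lab)
    (hfix : ∀ p ∈ pvCells grid, pvStep lab p = lab.getD p 0)
    (p q : Nat × Nat) (hp : p ∈ pvCells grid) (hconn : connP grid p q) :
    lab.getD p 0 = lab.getD q 0 := by
  induction hconn with
  | refl => rfl
  | tail hxb hstep ih =>
    rename_i b c
    have hb : b ∈ pvCells grid := (mem_pvCells grid b).mpr hstep.1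
    have hcc : c ∈ pvCells grid := (mem_pvCells grid c).mpr hstep.2.1
    exact ih.trans (fix_edge grid lab hgood hfix b c hb hcc hstep.2.2)

theorem pvIdx_inj (C : Nat) (a b : Nat × Nat) (ha : a.2 < C) (hb : b.2 < C)
    (h : pvIdx C a = pvIdx C b) : a = b := by
  unfold pvIdx at h
  have hC : 0 < C := by omega
  have ha' : (a.1 * C + a.2) / C = a.1 := by
    rw [Nat.mul_comm, Nat.mul_add_div hC, Nat.div_eq_of_lt ha]; omega
  have hb' : (b.1 * C + b.2) / C = b.1 := by
    rw [Nat.mul_comm, Nat.mul_add_div hC, Nat.div_eq_of_lt hb]; omega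
  have h1 : a.1 = b.1 := by rw [← ha', ← hb', h]
  have h2 : a.2 = b.2 := by rw [h1] at h; omega
  exact Prod.ext h1 h2

theorem conn_of_lab (grid : List (List Int)) (lab : PySem.Dict (Nat × Nat) Nat)
    (hgood : labGood grid lab)
    (p q : Nat × Nat) (hp : p ∈ pvCells grid) (hq : q ∈ pvCells grid)
    (h : lab.getD p 0 = lab.getD q 0) : connP grid p q := by
  obtain ⟨a, ha, hca, hea⟩ := hgood.2 p hp
  obtain ⟨b, hb, hcb, heb⟩ := hgood.2 q hq
  have hab : a = b := by
    apply pvIdx_inj (pvC grid) a b ((mem_pvCells grid a).mp ha).2.1 ((mem_pvCells grid b).mp hb).2.1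
    rw [← hea, ← heb, h]
  subst hab
  exact hca.trans (connP_symm grid q a hcb)

theorem getD_sumsFold (l : List (Nat × Nat)) (key : Nat × Nat → Nat) (v : Nat × Nat → Int)
    (d : PySem.Dict Nat Int) (L : Nat) :
    (l.foldl (fun d p => d.insert (key p) (d.getD (key p) 0 + v p)) d).getD L 0
      = d.getD L 0 + ((l.filter (fun p => key p = L)).map v).sum := by
  induction l generalizing d with
  | nil => simp
  | cons p l ih =>
    simp only [List.foldl_cons, ih, PySem.Dict.getD_insert, List.filter_cons]
    by_cases hk : key p = L
    · rw [if_pos hk.symm, if_pos (by simp [hk])]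
      simp only [List.map_cons, List.sum_cons, hk]
      ring
    · rw [if_neg (fun hh => hk hh.symm), if_neg (by simp [hk])]

theorem foldl_max_le_of (l : List Int) (b c : Int) (hb : b ≤ c) (h : ∀ x ∈ l, x ≤ c) :
    l.foldl max b ≤ c := by
  induction l generalizing b with
  | nil => simpa
  | cons x l ih =>
    simp only [List.foldl_cons]
    exact ih _ (max_le hb (h x (List.mem_cons_self ..)))
      (fun y hy => h y (List.mem_cons_of_mem _ hy))

theorem b_eq_spec (grid : List (List Int)) : findMaxFish_alt grid = specMax grid := by
  have hgood0 : labGood grid (pvMkMap (pvCells grid) (pvIdx (pvC grid))) := by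
    refine ⟨contains_pvMkMap _ _, ?_⟩
    intro p hp
    exact ⟨p, hp, Relation.ReflTransGen.refl, by rw [getD_pvMkMap, if_pos hp]⟩
  obtain ⟨hgoodF, hfixF⟩ := propLoop_good grid _ hgood0
  set labF := pvPropLoop (pvCells grid) (pvMkMap (pvCells grid) (pvIdx (pvC grid))) with hlabF
  set sums := (pvCells grid).foldl (fun d p =>
      d.insert (labF.getD p 0) (d.getD (labF.getD p 0) 0 + pvVal grid p)) PySem.Dict.empty
    with hsums
  have hBeq : findMaxFish_alt grid = sums.values.foldl (fun b s => max b s) 0 := rfl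
  have hkeyconn : ∀ p q, p ∈ pvCells grid → q ∈ pvCells grid →
      (labF.getD p 0 = labF.getD q 0 ↔ connP grid p q) :=
    fun p q hp hq => ⟨fun h => conn_of_lab grid labF hgoodF p q hp hq h,
      fun h => lab_of_conn grid labF hgoodF hfixF p q hp h⟩
  have hnodupkeys : sums.keys.Nodup := by
    rw [hsums]
    exact PySem.Dict.nodup_keys_foldl_insert_key _ _ _ _ PySem.Dict.nodup_keys_empty
  have hkeys : ∀ L, L ∈ sums.keys ↔ ∃ q ∈ pvCells grid, labF.getD q 0 = L := by
    intro L
    rw [hsums, PySem.Dict.keys_foldl_insert_key]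
    have : PySem.Set.update (PySem.Dict.empty : PySem.Dict Nat Int).keys
        ((pvCells grid).map (fun p => labF.getD p 0))
        = PySem.Set.ofList ((pvCells grid).map (fun p => labF.getD p 0)) := by
      rw [PySem.Set.ofList_eq_foldl]
      rfl
    rw [this, PySem.Set.mem_ofList, List.mem_map]
  have hval : ∀ q ∈ pvCells grid, sums.getD (labF.getD q 0) 0 = compSum grid q := by
    intro q hq
    rw [hsums, getD_sumsFold, PySem.Dict.getD_empty, zero_add]
    have hnodupf : ((pvCells grid).filter
        (fun p => labF.getD p 0 = labF.getD q 0)).Nodup :=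
      List.Nodup.filter _ (nodup_pvCells grid)
    rw [← List.sum_toFinset _ hnodupf]
    have hset : ((pvCells grid).filter
        (fun p => labF.getD p 0 = labF.getD q 0)).toFinset = comp grid q := by
      ext z
      simp only [List.mem_toFinset, List.mem_filter, decide_eq_true_eq]
      rw [mem_comp grid q z ((mem_pvCells grid q).mp hq)]
      constructor
      · rintro ⟨hz, he⟩
        exact connP_symm grid z q ((hkeyconn z q hz hq).mp he)
      · intro hc
        have hz : z ∈ pvCells grid :=
          (mem_pvCells grid z).mpr (connP_nz grid q z ((mem_pvCells grid q).mp hq) hc)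
        exact ⟨hz, (hkeyconn z q hz hq).mpr (connP_symm grid q z hc)⟩
    rw [hset]
    rfl
  have hvalues : sums.values = sums.keys.map (fun k => sums.getD k 0) :=
    PySem.Dict.values_eq_map_keys sums hnodupkeys 0
  rw [hBeq, hvalues]
  show (sums.keys.map fun k => sums.getD k 0).foldl max 0 = specMax grid
  unfold specMax
  apply le_antisymm
  · apply foldl_max_le_of
    · exact (PySem.List.le_foldl_max _ _).1
    · intro x hx
      obtain ⟨L, hL, hx⟩ := List.mem_map.mp hx
      obtain ⟨qq, hqq, hLq⟩ := (hkeys L).mp hL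
      subst hx
      rw [← hLq, hval qq hqq]
      exact (PySem.List.le_foldl_max _ 0).2 _ (List.mem_map.mpr ⟨qq, hqq, rfl⟩)
  · apply foldl_max_le_of
    · exact (PySem.List.le_foldl_max _ _).1
    · intro x hx
      obtain ⟨qq, hqq, hx⟩ := List.mem_map.mp hx
      subst hx
      have hL : labF.getD qq 0 ∈ sums.keys := (hkeys _).mpr ⟨qq, hqq, rfl⟩
      rw [← hval qq hqq]
      exact (PySem.List.le_foldl_max _ 0).2 _ (List.mem_map.mpr ⟨_, hL, rfl⟩)

-- ===== VERDICT (by name: the statement is the Claim_ definition above) =====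
theorem findMaxFish_spec : Claim_equal_findMaxFish := by
  intro grid _ _
  unfold Spec_findMaxFish
  rw [a_eq_spec, b_eq_spec]
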